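-- pv_equiv track=rewrite | github.com/yzhixiong/ABC | dict.py | delli
-- ===== SOURCE A (Python) =====
-- def delli(l:list,i) -> (list,int):
--     r=[]
--     a=-1
--     b=0
--     for j in l:
--         if i!=j :
--             r.append(j)
--         else :
--             a=b
--         b=b+1
--     return r,a
-- ===== SOURCE B (Python) =====
-- def delli(l: list, i) -> (list, int):
--     r = [x for x in l if i != x]
--     a = -1
--     for k in range(len(l) - 1, -1, -1):
--         if l[k] == i:
--             a = k
--             break
--     return r, a
-- ===== Notes on version B (the rewrite author's own statement) =====
-- stated objective: alternative
-- what changed: Replaces A's single fused forward loop carrying (result, match-index, counter) state by two independent passes: a filter comprehension for the list and a backward scan with early exit for the last matching index.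
import Mathlib
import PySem

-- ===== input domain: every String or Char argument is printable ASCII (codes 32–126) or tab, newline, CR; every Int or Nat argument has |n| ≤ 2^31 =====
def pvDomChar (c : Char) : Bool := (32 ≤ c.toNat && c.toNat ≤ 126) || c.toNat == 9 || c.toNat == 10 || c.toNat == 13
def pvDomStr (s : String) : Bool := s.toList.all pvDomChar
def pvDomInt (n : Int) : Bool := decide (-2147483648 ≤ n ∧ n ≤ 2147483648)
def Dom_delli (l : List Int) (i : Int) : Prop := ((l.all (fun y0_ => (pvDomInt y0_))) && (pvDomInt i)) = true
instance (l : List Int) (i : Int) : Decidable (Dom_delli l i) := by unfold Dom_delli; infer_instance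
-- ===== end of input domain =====

-- B replaces A's single fused forward loop by two independent passes (forward filter + backward last-index scan with early exit); same cost, different decomposition.


-- ===== PORT A =====
-- A's for-loop carrying state (r, a, b), transliterated as structural recursion over l
def delliGo (i : Int) : List Int → List Int → Int → Int → List Int × Int
  | [], r, a, _ => (r, a)
  | j :: t, r, a, b => if i ≠ j then delliGo i t (r ++ [j]) a (b + 1) else delliGo i t r b (b + 1)

def delli (l : List Int) (i : Int) : List Int × Int :=
  delliGo i l [] (-1) 0

-- ===== PORT B =====
-- backward scan: fuel n checks index n-1 (k runs len-1 .. 0, early break at first match)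
def delliLastGo (l : List Int) (i : Int) : Nat → Int
  | 0 => -1
  | Nat.succ k => if l.getD k 0 = i then (k : Int) else delliLastGo l i k

def delli_alt (l : List Int) (i : Int) : List Int × Int :=
  (l.filter (fun x => i != x), delliLastGo l i l.length)

-- ===== PRECONDITION & SPEC =====
def Spec_delli (l : List Int) (i : Int) (out : List Int × Int) : Prop := out = delli_alt l i
instance (l : List Int) (i : Int) (out : List Int × Int) : Decidable (Spec_delli l i out) := by unfold Spec_delli; infer_instance

-- ===== CLAIM (what is proved, stated in full; the proofs are below) =====
def Claim_equal_delli : Prop := ∀ (l : List Int) (i : Int), Dom_delli l i → Spec_delli l i (delli l i)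

-- ===== LEMMAS AND PROOFS =====

-- proof-only helper: last index of i in l (from the front, -1 if absent)
def lastIdx (i : Int) : List Int → Int
  | [] => -1
  | j :: t => if lastIdx i t ≥ 0 then lastIdx i t + 1 else if i = j then 0 else -1

theorem lastIdx_ge : ∀ (i : Int) (l : List Int), lastIdx i l ≥ -1 := by
  intro i l
  induction l with
  | nil => simp [lastIdx]
  | cons j t ih => simp only [lastIdx]; split_ifs <;> omega

theorem delliGo_eq (i : Int) : ∀ (t r : List Int) (a b : Int),
    delliGo i t r a b =
      (r ++ t.filter (fun x => i != x), if lastIdx i t = -1 then a else b + lastIdx i t) := by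
  intro t
  induction t with
  | nil => intro r a b; simp [delliGo, lastIdx]
  | cons j t ih =>
    intro r a b
    by_cases h : i = j
    · subst h
      have hg := lastIdx_ge i t
      rw [delliGo, if_neg (by simp), ih]
      simp only [lastIdx, List.filter_cons, bne_self_eq_false, Bool.false_eq_true, if_false,
        Prod.mk.injEq]
      refine ⟨by trivial, ?_⟩
      split_ifs <;> simp_all <;> omega
    · have hg := lastIdx_ge i t
      have hb : (i != j) = true := by simpa [bne] using h
      rw [delliGo, if_pos h, ih]
      simp only [lastIdx, List.filter_cons, hb, if_true, List.append_assoc,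
        List.singleton_append, Prod.mk.injEq, h]
      refine ⟨by trivial, by split_ifs <;> omega⟩

theorem delliLastGo_frozen (i x : Int) : ∀ (l : List Int) (k : Nat), k ≤ l.length →
    delliLastGo (l ++ [x]) i k = delliLastGo l i k := by
  intro l k
  induction k with
  | zero => intro _; rfl
  | succ k ih =>
    intro hk
    have hlt : k < l.length := by omega
    simp only [delliLastGo, List.getD, List.getElem?_append_left hlt, ih (by omega)]
    rfl

theorem lastIdx_append (i x : Int) : ∀ (l : List Int),
    lastIdx i (l ++ [x]) = if i = x then (l.length : Int) else lastIdx i l := by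
  intro l
  induction l with
  | nil => simp [lastIdx]
  | cons j t ih =>
    simp only [List.cons_append, lastIdx, ih, List.length_cons]
    have hg := lastIdx_ge i t
    split_ifs <;> first | rfl | omega

theorem delliLastGo_eq (i : Int) : ∀ (l : List Int), delliLastGo l i l.length = lastIdx i l := by
  intro l
  induction l using List.reverseRecOn with
  | nil => rfl
  | append_singleton l x ih =>
    simp only [List.length_append, List.length_singleton, lastIdx_append]
    show delliLastGo (l ++ [x]) i (l.length + 1) = _
    simp only [delliLastGo, List.getD, List.getElem?_append_right (le_refl l.length),
      Nat.sub_self, List.getElem?_cons_zero, Option.getD_some]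
    rw [delliLastGo_frozen i x l l.length (le_refl _), ih]
    by_cases h : x = i
    · simp [h]
    · have : ¬ i = x := fun hh => h hh.symm
      simp [h, this]

-- ===== VERDICT (by name: the statement is the Claim_ definition above) =====
theorem delli_spec : Claim_equal_delli := by
  intro l i _
  show delli l i = delli_alt l i
  rw [delli, delliGo_eq, delli_alt, delliLastGo_eq]
  have hg := lastIdx_ge i l
  simp only [List.nil_append, Prod.mk.injEq]
  refine ⟨by trivial, by split_ifs <;> omega⟩
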